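-- pv_equiv track=rewrite | github.com/mbilalakmal/BoonGiggle | proximity_parser.py | _evaluate_proximity_query
-- ===== SOURCE A (Python) =====
-- def _is_proximity_in_doc(doc, term1, term2, proximity, inverted_index):
--     '''
--     Return `True` if two terms are `proximity` words apart in `doc`.
--
--     `False` otherwise.
--     '''
--     for position1 in inverted_index[term1][doc]:
--         for position2 in inverted_index[term2][doc]:
--             if abs(position2 - position1) == proximity:
--                 return True
--     return False
--
-- def _evaluate_proximity_query(term1, term2, proximity, inverted_index):
--     '''
--     Return a set containing relevant doc_ids.
--     '''
--     # if one of the terms is not indexed return an empty set.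
--     if not set.issubset(
--         set([term1, term2]),
--         set(inverted_index.keys())
--     ):
--         return set()
--
--     result = set()
--     doc_ids1 = set(inverted_index[term1].keys())
--     doc_ids2 = set(inverted_index[term2].keys())
--
--     for doc_id in doc_ids1:
--         if doc_id not in doc_ids2:
--             continue
--
--         if _is_proximity_in_doc(
--             doc_id, term1, term2, proximity, inverted_index
--             ):
--             result.add(doc_id)
--
--     return result
-- ===== SOURCE B (Python) =====
-- def _merge_gap(positions1, positions2, gap):
--     '''Two-pointer scan over two sorted lists: is there a in positions1 and
--     b in positions2 with b - a == gap (gap >= 0)?'''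
--     i, j = 0, 0
--     while i < len(positions1) and j < len(positions2):
--         d = positions2[j] - positions1[i]
--         if d == gap:
--             return True
--         if d < gap:
--             j += 1
--         else:
--             i += 1
--     return False
--
--
-- def _evaluate_proximity_query(term1, term2, proximity, inverted_index):
--     '''
--     Return a set containing relevant doc_ids.
--     '''
--     # a term that is not indexed, or a negative distance, can never match
--     if term1 not in inverted_index or term2 not in inverted_index or proximity < 0:
--         return set()
--
--     docs1 = inverted_index[term1]
--     docs2 = inverted_index[term2]
--
--     result = set()
--     for doc_id in docs1:
--         if doc_id not in docs2:
--             continue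
--         p1 = sorted(docs1[doc_id])
--         p2 = sorted(docs2[doc_id])
--         if _merge_gap(p1, p2, proximity) or _merge_gap(p2, p1, proximity):
--             result.add(doc_id)
--     return result
-- ===== Notes on version B (the rewrite author's own statement) =====
-- stated objective: alternative
-- what changed: Per shared doc, A's nested scan comparing every position pair is replaced by sorting the two position lists and running a linear two-pointer merge in each direction to detect an exact gap of |proximity|.
import Mathlib
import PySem

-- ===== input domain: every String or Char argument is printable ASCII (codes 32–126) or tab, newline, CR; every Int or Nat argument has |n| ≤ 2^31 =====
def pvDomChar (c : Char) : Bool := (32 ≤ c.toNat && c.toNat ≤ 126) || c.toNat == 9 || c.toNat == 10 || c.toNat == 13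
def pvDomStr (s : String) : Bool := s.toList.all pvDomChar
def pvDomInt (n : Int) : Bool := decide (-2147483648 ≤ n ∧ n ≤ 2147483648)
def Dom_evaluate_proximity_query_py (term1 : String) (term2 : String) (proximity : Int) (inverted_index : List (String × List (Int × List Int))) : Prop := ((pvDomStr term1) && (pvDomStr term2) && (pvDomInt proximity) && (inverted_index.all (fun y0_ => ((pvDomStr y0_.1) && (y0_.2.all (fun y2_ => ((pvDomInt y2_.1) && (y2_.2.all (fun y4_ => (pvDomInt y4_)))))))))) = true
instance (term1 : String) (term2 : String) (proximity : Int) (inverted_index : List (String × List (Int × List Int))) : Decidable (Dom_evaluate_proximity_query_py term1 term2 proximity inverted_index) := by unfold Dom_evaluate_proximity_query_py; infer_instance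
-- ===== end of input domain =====

-- B replaces A's quadratic nested scan over each shared doc's two position lists by a
-- two-pointer merge over the sorted position lists (alternative algorithm; return value only).

-- ===== PORT A =====
-- the caller only invokes this when both terms and the doc are present, so getD [] is exact there
def is_proximity_in_doc_py (doc : Int) (term1 : String) (term2 : String) (proximity : Int) (inverted_index : List (String × List (Int × List Int))) : Bool :=
  let positions1 := (PySem.Dict.mk ((PySem.Dict.mk inverted_index).getD term1 [])).getD doc []
  let positions2 := (PySem.Dict.mk ((PySem.Dict.mk inverted_index).getD term2 [])).getD doc []
  positions1.any (fun position1 => positions2.any (fun position2 => |position2 - position1| == proximity))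

def evaluate_proximity_query_py (term1 : String) (term2 : String) (proximity : Int) (inverted_index : List (String × List (Int × List Int))) : List Int :=
  if !(PySem.Set.issubset (PySem.Set.ofList [term1, term2]) (PySem.Set.ofList ((PySem.Dict.mk inverted_index).keys))) then []
  else
    let doc_ids1 : PySem.Set Int := PySem.Set.ofList (PySem.Dict.mk ((PySem.Dict.mk inverted_index).getD term1 [])).keys
    let doc_ids2 : PySem.Set Int := PySem.Set.ofList (PySem.Dict.mk ((PySem.Dict.mk inverted_index).getD term2 [])).keys
    doc_ids1.foldl (fun result doc_id =>
      if !(PySem.Set.contains doc_ids2 doc_id) then result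
      else if is_proximity_in_doc_py doc_id term1 term2 proximity inverted_index then PySem.Set.add result doc_id
      else result) []

-- ===== PORT B =====
def merge_gap : List Int → List Int → Int → Bool
  | p1h :: p1t, p2h :: p2t, gap =>
    let d := p2h - p1h
    if d = gap then true
    else if d < gap then merge_gap (p1h :: p1t) p2t gap
    else merge_gap p1t (p2h :: p2t) gap
  | _, _, _ => false
termination_by p1 p2 _ => p1.length + p2.length

-- 'for doc_id in docs1' iterates the dict's (duplicate-free) keys: dedup of the key list
def evaluate_proximity_query_py_alt (term1 : String) (term2 : String) (proximity : Int) (inverted_index : List (String × List (Int × List Int))) : List Int :=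
  let idx := PySem.Dict.mk inverted_index
  if !idx.contains term1 || !idx.contains term2 || decide (proximity < 0) then []
  else
    let docs1 := PySem.Dict.mk (idx.getD term1 [])
    let docs2 := PySem.Dict.mk (idx.getD term2 [])
    (PySem.List.dedup docs1.keys).foldl (fun result doc_id =>
      if !docs2.contains doc_id then result
      else
        let p1 := PySem.List.sorted (docs1.getD doc_id []) (fun x => x) false
        let p2 := PySem.List.sorted (docs2.getD doc_id []) (fun x => x) false
        if merge_gap p1 p2 proximity || merge_gap p2 p1 proximity then PySem.Set.add result doc_id
        else result) []

-- ===== PRECONDITION & SPEC =====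
def Spec_evaluate_proximity_query_py (term1 : String) (term2 : String) (proximity : Int) (inverted_index : List (String × List (Int × List Int))) (out : List Int) : Prop := out = evaluate_proximity_query_py_alt term1 term2 proximity inverted_index
instance (term1 : String) (term2 : String) (proximity : Int) (inverted_index : List (String × List (Int × List Int))) (out : List Int) : Decidable (Spec_evaluate_proximity_query_py term1 term2 proximity inverted_index out) := by unfold Spec_evaluate_proximity_query_py; infer_instance

-- ===== CLAIM (what is proved, stated in full; the proofs are below) =====
def Claim_equal_evaluate_proximity_query_py : Prop := ∀ (term1 : String) (term2 : String) (proximity : Int) (inverted_index : List (String × List (Int × List Int))), Dom_evaluate_proximity_query_py term1 term2 proximity inverted_index → Spec_evaluate_proximity_query_py term1 term2 proximity inverted_index (evaluate_proximity_query_py term1 term2 proximity inverted_index)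

-- ===== LEMMAS AND PROOFS =====

-- if the two-pointer scan answers true, some pair realises the gap
theorem mg_sound (la lb : List Int) (k : Int) (h : merge_gap la lb k = true) :
    ∃ a ∈ la, ∃ b ∈ lb, b - a = k := by
  induction la, lb, k using merge_gap.induct with
  | case1 a as b bs d => exact ⟨a, by simp, b, by simp, rfl⟩
  | case2 a as b bs k d hd hlt ih =>
    rw [merge_gap, if_neg hd, if_pos hlt] at h
    obtain ⟨x, hx, y, hy, hxy⟩ := ih h
    exact ⟨x, hx, y, List.mem_cons_of_mem _ hy, hxy⟩
  | case3 a as b bs k d hd hlt ih =>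
    rw [merge_gap, if_neg hd, if_neg hlt] at h
    obtain ⟨x, hx, y, hy, hxy⟩ := ih h
    exact ⟨x, List.mem_cons_of_mem _ hx, y, hy, hxy⟩
  | case4 p1 p2 k h2 =>
    exfalso
    rcases p1 with _ | ⟨a, as⟩
    · simp [merge_gap] at h
    · rcases p2 with _ | ⟨b, bs⟩
      · simp [merge_gap] at h
      · exact h2 a as b bs rfl rfl

-- on sorted (non-decreasing) lists the scan misses no realising pair
theorem mg_complete (la lb : List Int) (k : Int)
    (ha : la.Pairwise (· ≤ ·)) (hb : lb.Pairwise (· ≤ ·))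
    (h : ∃ a ∈ la, ∃ b ∈ lb, b - a = k) : merge_gap la lb k = true := by
  obtain ⟨x, hx, y, hy, hxy⟩ := h
  induction la, lb, k using merge_gap.induct generalizing x y with
  | case1 a as b bs d => rw [merge_gap, if_pos (show b - a = d from rfl)]
  | case2 a as b bs k d hd hlt ih =>
    rw [merge_gap, if_neg hd, if_pos hlt]
    rcases List.mem_cons.mp hy with rfl | hy'
    · rcases List.mem_cons.mp hx with rfl | hx'
      · omega
      · exfalso; have := (List.pairwise_cons.mp ha).1 x hx'; omega
    · exact ih ha (List.Pairwise.sublist (List.sublist_cons_self _ _) hb) x hx y hy' hxy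
  | case3 a as b bs k d hd hlt ih =>
    rw [merge_gap, if_neg hd, if_neg hlt]
    rcases List.mem_cons.mp hx with rfl | hx'
    · rcases List.mem_cons.mp hy with rfl | hy'
      · omega
      · exfalso; have := (List.pairwise_cons.mp hb).1 y hy'; omega
    · exact ih (List.Pairwise.sublist (List.sublist_cons_self _ _) ha) hb x hx' y hy hxy
  | case4 p1 p2 k h2 =>
    exfalso
    rcases p1 with _ | ⟨a, as⟩
    · simp at hx
    · rcases p2 with _ | ⟨b, bs⟩
      · simp at hy
      · exact h2 a as b bs rfl rfl

theorem sorted_pw (xs : List Int) :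
    (PySem.List.sorted xs (fun x => x) false).Pairwise (· ≤ ·) := by
  simpa using PySem.List.sorted_pairwise xs (fun x => x)

theorem foldl_id {α β : Type} (l : List β) (acc : α) (f : α → β → α)
    (h : ∀ acc x, f acc x = acc) : l.foldl f acc = acc := by
  induction l generalizing acc with
  | nil => rfl
  | cons x xs ih => simp only [List.foldl_cons, h, ih]

-- A's nested abs scan over one doc's position lists = B's two directed merges over the sorted lists
theorem per_doc (P1 P2 : List Int) (prox : Int) (hp : 0 ≤ prox) :
    (P1.any (fun a => P2.any (fun b => |b - a| == prox)))
    = (merge_gap (PySem.List.sorted P1 (fun x => x) false) (PySem.List.sorted P2 (fun x => x) false) prox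
       || merge_gap (PySem.List.sorted P2 (fun x => x) false) (PySem.List.sorted P1 (fun x => x) false) prox) := by
  rw [Bool.eq_iff_iff]
  simp only [List.any_eq_true, Bool.or_eq_true, beq_iff_eq]
  constructor
  · rintro ⟨a, ha, b, hb, habs⟩
    rcases (abs_eq hp).mp habs with h' | h'
    · exact Or.inl (mg_complete _ _ _ (sorted_pw P1) (sorted_pw P2)
        ⟨a, (PySem.List.mem_sorted _ _ _ _).mpr ha, b, (PySem.List.mem_sorted _ _ _ _).mpr hb, h'⟩)
    · exact Or.inr (mg_complete _ _ _ (sorted_pw P2) (sorted_pw P1)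
        ⟨b, (PySem.List.mem_sorted _ _ _ _).mpr hb, a, (PySem.List.mem_sorted _ _ _ _).mpr ha, by omega⟩)
  · rintro (h | h)
    · obtain ⟨a, ha, b, hb, hk⟩ := mg_sound _ _ _ h
      exact ⟨a, (PySem.List.mem_sorted _ _ _ _).mp ha, b, (PySem.List.mem_sorted _ _ _ _).mp hb, by rw [abs_eq hp]; omega⟩
    · obtain ⟨b, hb, a, ha, hk⟩ := mg_sound _ _ _ h
      exact ⟨a, (PySem.List.mem_sorted _ _ _ _).mp ha, b, (PySem.List.mem_sorted _ _ _ _).mp hb, by rw [abs_eq hp]; omega⟩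

theorem ports_agree (term1 : String) (term2 : String) (proximity : Int) (inverted_index : List (String × List (Int × List Int))) :
    evaluate_proximity_query_py term1 term2 proximity inverted_index = evaluate_proximity_query_py_alt term1 term2 proximity inverted_index := by
  have hsub : PySem.Set.issubset (PySem.Set.ofList [term1, term2]) (PySem.Set.ofList ((PySem.Dict.mk inverted_index).keys))
      = ((PySem.Dict.mk inverted_index).contains term1 && (PySem.Dict.mk inverted_index).contains term2) := by
    rw [Bool.eq_iff_iff]
    simp only [PySem.Set.issubset_iff, PySem.Set.mem_ofList, Bool.and_eq_true,
      PySem.Dict.contains_iff_mem_keys, List.mem_cons, List.not_mem_nil, or_false]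
    constructor
    · intro h; exact ⟨h term1 (Or.inl rfl), h term2 (Or.inr rfl)⟩
    · rintro ⟨ha, hb⟩ x (rfl | rfl) <;> assumption
  simp only [evaluate_proximity_query_py, evaluate_proximity_query_py_alt, hsub]
  cases hc1 : (PySem.Dict.mk inverted_index).contains term1 with
  | false => simp
  | true =>
    cases hc2 : (PySem.Dict.mk inverted_index).contains term2 with
    | false => simp
    | true =>
      by_cases hp : proximity < 0
      · simp only [hp, decide_true, Bool.and_self, Bool.not_true, Bool.or_true,
          Bool.false_or, if_true, Bool.false_eq_true, if_false]
        apply foldl_id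
        intro acc doc
        have hz : is_proximity_in_doc_py doc term1 term2 proximity inverted_index = false := by
          simp only [is_proximity_in_doc_py, List.any_eq_false]
          intro a _ hb
          obtain ⟨b, _, hbb⟩ := List.any_eq_true.mp hb
          have hb' := beq_iff_eq.mp hbb
          have := abs_nonneg (b - a)
          omega
        rw [hz]
        split <;> rfl
      · simp only [Bool.and_self, Bool.not_true, Bool.false_or,
          decide_eq_false hp, if_false, Bool.false_eq_true,
          PySem.List.dedup_eq_ofList]
        congr 1
        funext acc doc
        have e1 : PySem.Set.contains (PySem.Set.ofList (PySem.Dict.mk ((PySem.Dict.mk inverted_index).getD term2 [])).keys) doc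
            = (PySem.Dict.mk ((PySem.Dict.mk inverted_index).getD term2 [])).contains doc := by
          rw [Bool.eq_iff_iff]
          simp [PySem.Set.mem_ofList]
        have e2 : is_proximity_in_doc_py doc term1 term2 proximity inverted_index
            = (merge_gap (PySem.List.sorted ((PySem.Dict.mk ((PySem.Dict.mk inverted_index).getD term1 [])).getD doc []) (fun x => x) false)
                         (PySem.List.sorted ((PySem.Dict.mk ((PySem.Dict.mk inverted_index).getD term2 [])).getD doc []) (fun x => x) false) proximity
               || merge_gap (PySem.List.sorted ((PySem.Dict.mk ((PySem.Dict.mk inverted_index).getD term2 [])).getD doc []) (fun x => x) false)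
                            (PySem.List.sorted ((PySem.Dict.mk ((PySem.Dict.mk inverted_index).getD term1 [])).getD doc []) (fun x => x) false) proximity) := by
          simp only [is_proximity_in_doc_py]
          exact per_doc _ _ _ (by omega)
        rw [e1, e2]

-- ===== VERDICT (by name: the statement is the Claim_ definition above) =====
theorem evaluate_proximity_query_py_spec : Claim_equal_evaluate_proximity_query_py := by
  intro term1 term2 proximity inverted_index _
  exact ports_agree term1 term2 proximity inverted_index
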